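-- pv_equiv track=rewrite | github.com/dongzzzzzzzzz/Property_skill | helpers.py | classify_image_quality
-- ===== SOURCE A (Python) =====
-- from typing import Any, Iterable
--
-- PLACEHOLDER_IMAGE_MARKERS = [
--     "carddefault",
--     "placeholder",
--     "default-image",
--     "defaultimg",
--     "no-image",
-- ]
--
-- def classify_image_quality(image_urls: Iterable[str] | None) -> str:
--     urls = [url for url in (image_urls or []) if url]
--     if not urls:
--         return "missing"
--     placeholder_count = 0
--     for url in urls:
--         lowered = url.lower()
--         if any(marker in lowered for marker in PLACEHOLDER_IMAGE_MARKERS):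
--             placeholder_count += 1
--     if placeholder_count == len(urls):
--         return "placeholder_only"
--     if placeholder_count:
--         return "mixed"
--     return "real_images"
-- ===== SOURCE B (Python) =====
-- PLACEHOLDER_IMAGE_MARKERS = [
--     "carddefault",
--     "placeholder",
--     "default-image",
--     "defaultimg",
--     "no-image",
-- ]
--
-- def _is_placeholder(url):
--     lowered = url.lower()
--     return any(marker in lowered for marker in PLACEHOLDER_IMAGE_MARKERS)
--
-- def classify_image_quality(image_urls):
--     # Early-exit state machine: no filtered list is built and no count is kept.
--     # Two flags record which kinds have been seen; as soon as both kinds occur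
--     # the answer is known to be "mixed" and we stop scanning.
--     seen_placeholder = False
--     seen_real = False
--     for url in (image_urls or []):
--         if not url:
--             continue
--         if _is_placeholder(url):
--             sp, sr = True, seen_real
--         else:
--             sp, sr = seen_placeholder, True
--         if sp and sr:
--             return "mixed"
--         seen_placeholder, seen_real = sp, sr
--     if seen_placeholder:
--         return "placeholder_only"
--     if seen_real:
--         return "real_images"
--     return "missing"
-- ===== Notes on version B (the rewrite author's own statement) =====
-- stated objective: alternative
-- what changed: Replaces A's build-filtered-list + placeholder counter + compare-to-length pipeline with a short-circuiting state machine: a single streaming scan over two seen-kind flags that returns 'mixed' as soon as both kinds occur (possibly without reading the rest), and derives 'missing' from both flags staying false instead of an empty-list guard.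
import Mathlib
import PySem

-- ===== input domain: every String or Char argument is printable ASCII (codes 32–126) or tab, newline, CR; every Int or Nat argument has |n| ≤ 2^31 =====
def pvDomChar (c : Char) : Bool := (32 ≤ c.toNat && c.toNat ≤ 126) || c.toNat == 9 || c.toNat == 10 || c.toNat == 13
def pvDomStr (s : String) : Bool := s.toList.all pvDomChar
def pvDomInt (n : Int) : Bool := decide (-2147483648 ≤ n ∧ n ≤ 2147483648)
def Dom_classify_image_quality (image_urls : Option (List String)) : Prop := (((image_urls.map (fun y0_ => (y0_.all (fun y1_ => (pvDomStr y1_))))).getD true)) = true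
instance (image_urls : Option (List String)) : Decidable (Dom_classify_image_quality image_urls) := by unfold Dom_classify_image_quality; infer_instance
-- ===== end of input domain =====

-- B replaces A's filtered list + placeholder counter with a short-circuiting two-flag state machine (alternative decomposition); same results.
-- ===== PORT A =====
def PLACEHOLDER_IMAGE_MARKERS : List String :=
  ["carddefault", "placeholder", "default-image", "defaultimg", "no-image"]

def classify_image_quality (image_urls : Option (List String)) : String :=
  let urls := (image_urls.getD []).filter (fun url => !(url == ""))
  if urls.isEmpty then "missing"
  else
    let placeholder_count : Int := urls.foldl (fun acc url =>
      let lowered := PySem.Str.lower url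
      if PLACEHOLDER_IMAGE_MARKERS.any (fun marker => PySem.Str.isIn marker lowered)
      then acc + 1 else acc) 0
    if placeholder_count == (urls.length : Int) then "placeholder_only"
    else if !(placeholder_count == 0) then "mixed"
    else "real_images"

-- ===== PORT B =====
def pvIsPlaceholder (url : String) : Bool :=
  let lowered := PySem.Str.lower url
  PLACEHOLDER_IMAGE_MARKERS.any (fun marker => PySem.Str.isIn marker lowered)

-- the scanning loop of B: early exit with "mixed" once both kinds were seen
def classify_image_quality_go : List String → Bool → Bool → String
  | [], seen_placeholder, seen_real =>
      if seen_placeholder then "placeholder_only"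
      else if seen_real then "real_images"
      else "missing"
  | url :: rest, seen_placeholder, seen_real =>
      if url == "" then classify_image_quality_go rest seen_placeholder seen_real
      else
        let st := if pvIsPlaceholder url then (true, seen_real) else (seen_placeholder, true)
        if st.1 && st.2 then "mixed"
        else classify_image_quality_go rest st.1 st.2

def classify_image_quality_alt (image_urls : Option (List String)) : String :=
  classify_image_quality_go (image_urls.getD []) false false

-- ===== PRECONDITION & SPEC =====
def Spec_classify_image_quality (image_urls : Option (List String)) (out : String) : Prop := out = classify_image_quality_alt image_urls
instance (image_urls : Option (List String)) (out : String) : Decidable (Spec_classify_image_quality image_urls out) := by unfold Spec_classify_image_quality; infer_instance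

-- ===== CLAIM (what is proved, stated in full; the proofs are below) =====
def Claim_equal_classify_image_quality : Prop := ∀ (image_urls : Option (List String)), Dom_classify_image_quality image_urls → Spec_classify_image_quality image_urls (classify_image_quality image_urls)

-- ===== LEMMAS AND PROOFS =====

-- the outcome of B's loop depends only on whether each kind occurs (flags or list)
def pvOutcome (hasPh hasReal : Bool) : String :=
  if hasPh && hasReal then "mixed"
  else if hasPh then "placeholder_only"
  else if hasReal then "real_images"
  else "missing"

theorem pv_go_spec (l : List String) (sp sr : Bool) (h : ¬ (sp = true ∧ sr = true)) :
    classify_image_quality_go l sp sr =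
      pvOutcome (sp || (l.filter (fun u => !(u == ""))).any pvIsPlaceholder)
                (sr || (l.filter (fun u => !(u == ""))).any (fun u => !pvIsPlaceholder u)) := by
  induction l generalizing sp sr with
  | nil =>
    simp only [List.filter_nil, List.any_nil, Bool.or_false]
    unfold classify_image_quality_go pvOutcome
    cases sp <;> cases sr <;> simp_all
  | cons x xs ih =>
    by_cases hx : x = ""
    · subst hx
      simpa [classify_image_quality_go] using ih sp sr h
    · have hx' : (x == "") = false := by simp [hx]
      simp only [classify_image_quality_go, hx', Bool.false_eq_true, if_false,
        List.filter_cons, Bool.not_false, if_true]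
      by_cases hph : pvIsPlaceholder x = true
      · simp only [hph, if_true, List.any_cons, Bool.not_true]
        by_cases hsr : sr = true
        · subst hsr; simp [pvOutcome]
        · have hsr' : sr = false := by cases sr <;> simp_all
          subst hsr'
          simpa using ih true false (by simp)
      · have hph' : pvIsPlaceholder x = false := by cases h' : pvIsPlaceholder x <;> simp_all
        simp only [hph', Bool.false_eq_true, if_false, List.any_cons, Bool.not_false]
        by_cases hsp : sp = true
        · subst hsp; simp [pvOutcome]
        · have hsp' : sp = false := by cases sp <;> simp_all
          subst hsp'
          simpa using ih false true (by simp)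

-- count as foldl
theorem pv_foldl_count {α : Type} (f : α → Bool) (l : List α) (a : Int) :
    l.foldl (fun acc x => if f x then acc + 1 else acc) a = a + (l.countP f : Int) := by
  induction l generalizing a with
  | nil => simp
  | cons x xs ih =>
    simp only [List.foldl_cons, List.countP_cons, ih]
    by_cases h : f x = true <;> simp [h] <;> omega

-- ===== VERDICT (by name: the statement is the Claim_ definition above) =====
theorem classify_image_quality_spec : Claim_equal_classify_image_quality := by
  intro image_urls _
  unfold Spec_classify_image_quality classify_image_quality classify_image_quality_alt
  rw [pv_go_spec _ false false (by simp)]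
  set l := image_urls.getD [] with hl
  set urls := l.filter (fun url => !(url == "")) with hurls
  simp only [Bool.false_or]
  by_cases hemp : urls.isEmpty
  · have : urls = [] := by simpa [List.isEmpty_iff] using hemp
    simp [hemp, this, pvOutcome]
  · have hne : urls ≠ [] := by simpa [List.isEmpty_iff] using hemp
    simp only [hemp, if_false, Bool.false_eq_true]
    have heq : (fun (acc : Int) url =>
        if (PLACEHOLDER_IMAGE_MARKERS.any fun marker => PySem.Str.isIn marker (PySem.Str.lower url)) = true
        then acc + 1 else acc)
        = (fun (acc : Int) url => if pvIsPlaceholder url = true then acc + 1 else acc) := rfl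
    rw [heq, pv_foldl_count pvIsPlaceholder urls 0]
    simp only [zero_add]
    by_cases hall : ∀ u ∈ urls, pvIsPlaceholder u = true
    · have h1 : urls.countP pvIsPlaceholder = urls.length := List.countP_eq_length.mpr hall
      have hph : urls.any pvIsPlaceholder = true := by
        obtain ⟨u, hu⟩ := List.exists_mem_of_ne_nil urls hne
        exact List.any_eq_true.mpr ⟨u, hu, hall u hu⟩
      have hre : urls.any (fun u => !pvIsPlaceholder u) = false := by
        simp only [List.any_eq_false]
        intro u hu; simp [hall u hu]
      simp [h1, hph, hre, pvOutcome]
    · have h1 : urls.countP pvIsPlaceholder ≠ urls.length := fun h => hall (List.countP_eq_length.mp h)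
      have hlen : urls.length ≠ 0 := by simpa using hne
      have e1 : ((urls.countP pvIsPlaceholder : Int) == (urls.length : Int)) = false := by
        simp only [beq_eq_false_iff_ne, ne_eq, Nat.cast_inj]; exact h1
      have hre : urls.any (fun u => !pvIsPlaceholder u) = true := by
        push_neg at hall
        obtain ⟨u, hu, hnu⟩ := hall
        exact List.any_eq_true.mpr ⟨u, hu, by simp_all⟩
      by_cases hnone : ∀ u ∈ urls, pvIsPlaceholder u = false
      · have h3 : urls.countP pvIsPlaceholder = 0 := by
          rw [List.countP_eq_zero]; intro u hu; simp [hnone u hu]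
        have hph : urls.any pvIsPlaceholder = false := by
          simp only [List.any_eq_false]; intro u hu; simp [hnone u hu]
        simp [h3, hph, hre, pvOutcome]
        exact fun h => hlen (by exact_mod_cast h.symm)
      · have h3 : urls.countP pvIsPlaceholder ≠ 0 := by
          rw [Ne, List.countP_eq_zero]
          intro h; exact hnone (fun u hu => by simpa using h u hu)
        have hph : urls.any pvIsPlaceholder = true := by
          push_neg at hnone
          obtain ⟨u, hu, hnu⟩ := hnone
          exact List.any_eq_true.mpr ⟨u, hu, by cases h' : pvIsPlaceholder u <;> simp_all⟩
        have e2 : ((urls.countP pvIsPlaceholder : Int) == (0 : Int)) = false := by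
          simp only [beq_eq_false_iff_ne, ne_eq, Nat.cast_eq_zero]; exact h3
        simp [e1, e2, hph, hre, pvOutcome]
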